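-- pv_equiv track=rewrite | github.com/allisonshawai-ctrl/kokoro-tts | scripts/sample_voices.py | group_voices
-- ===== SOURCE A (Python) =====
-- VOICE_GROUPS = {
--     "British Female": ["bf_alice", "bf_emma", "bf_lily", "bf_v0emma", "bf_v0isabella"],
--     "British Male":   ["bm_daniel", "bm_fable", "bm_george", "bm_lewis", "bm_v0george", "bm_v0lewis"],
--     "American Female":["af_alloy", "af_aoede", "af_bella", "af_heart", "af_jadzia", "af_jessica",
--                        "af_kore", "af_nicole", "af_nova", "af_river", "af_sarah", "af_sky"],
--     "American Male":  ["am_adam", "am_echo", "am_eric", "am_fenrir", "am_liam", "am_michael",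
--                        "am_onyx", "am_puck"],
--     "Other":          [],  # filled dynamically from API
-- }
--
-- def group_voices(all_voices):
--     """Sort voices into display groups."""
--     grouped = {k: [] for k in VOICE_GROUPS}
--     assigned = set()
--     for group, known in VOICE_GROUPS.items():
--         if group == "Other":
--             continue
--         for v in all_voices:
--             if v in known:
--                 grouped[group].append(v)
--                 assigned.add(v)
--     for v in all_voices:
--         if v not in assigned:
--             grouped["Other"].append(v)
--     return {k: v for k, v in grouped.items() if v}
-- ===== SOURCE B (Python) =====
-- VOICE_GROUPS = {
--     "British Female": ["bf_alice", "bf_emma", "bf_lily", "bf_v0emma", "bf_v0isabella"],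
--     "British Male":   ["bm_daniel", "bm_fable", "bm_george", "bm_lewis", "bm_v0george", "bm_v0lewis"],
--     "American Female":["af_alloy", "af_aoede", "af_bella", "af_heart", "af_jadzia", "af_jessica",
--                        "af_kore", "af_nicole", "af_nova", "af_river", "af_sarah", "af_sky"],
--     "American Male":  ["am_adam", "am_echo", "am_eric", "am_fenrir", "am_liam", "am_michael",
--                        "am_onyx", "am_puck"],
--     "Other":          [],
-- }
--
-- _VOICE_TO_GROUP = {v: g for g, vs in VOICE_GROUPS.items() if g != "Other" for v in vs}
--
-- def group_voices(all_voices):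
--     """Sort voices into display groups (single pass over an inverted lookup table)."""
--     grouped = {k: [] for k in VOICE_GROUPS}
--     for v in all_voices:
--         grouped[_VOICE_TO_GROUP.get(v, "Other")].append(v)
--     return {k: vs for k, vs in grouped.items() if vs}
-- ===== Notes on version B (the rewrite author's own statement) =====
-- stated objective: faster
-- what changed: Replaced A's group-by-group rescanning of all_voices (plus an 'assigned' set and a second full pass for 'Other') with one inverted voice-to-group lookup table built once and a single pass appending each voice to its group.
import Mathlib
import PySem

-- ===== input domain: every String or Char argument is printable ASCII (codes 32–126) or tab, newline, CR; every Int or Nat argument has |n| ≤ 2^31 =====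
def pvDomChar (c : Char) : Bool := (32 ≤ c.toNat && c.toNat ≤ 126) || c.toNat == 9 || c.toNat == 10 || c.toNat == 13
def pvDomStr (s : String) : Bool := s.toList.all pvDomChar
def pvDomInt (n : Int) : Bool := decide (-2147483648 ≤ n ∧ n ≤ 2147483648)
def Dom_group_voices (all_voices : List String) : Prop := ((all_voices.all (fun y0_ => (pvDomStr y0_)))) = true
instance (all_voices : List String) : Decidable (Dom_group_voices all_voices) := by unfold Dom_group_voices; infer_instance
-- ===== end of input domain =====

-- B replaces A's group-by-group rescans (plus an 'assigned' set and a second pass for "Other")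
-- with one inverted voice→group table built once and a single pass over all_voices.

-- ===== PORT A =====
def bfL : List String := ["bf_alice", "bf_emma", "bf_lily", "bf_v0emma", "bf_v0isabella"]
def bmL : List String := ["bm_daniel", "bm_fable", "bm_george", "bm_lewis", "bm_v0george", "bm_v0lewis"]
def afL : List String := ["af_alloy", "af_aoede", "af_bella", "af_heart", "af_jadzia", "af_jessica",
                          "af_kore", "af_nicole", "af_nova", "af_river", "af_sarah", "af_sky"]
def amL : List String := ["am_adam", "am_echo", "am_eric", "am_fenrir", "am_liam", "am_michael",
                          "am_onyx", "am_puck"]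
def VOICE_GROUPS : PySem.Dict String (List String) :=
  PySem.Dict.ofList [("British Female", bfL), ("British Male", bmL),
    ("American Female", afL), ("American Male", amL), ("Other", [])]

def group_voices (all_voices : List String) : List (String × List String) :=
  let grouped : PySem.Dict String (List String) :=
    VOICE_GROUPS.keys.foldl (fun d k => d.insert k []) PySem.Dict.empty
  let st :=
    VOICE_GROUPS.items.foldl (fun (st : PySem.Dict String (List String) × PySem.Set String) gk =>
      if gk.1 == "Other" then st
      else all_voices.foldl (fun st v =>
        if v ∈ gk.2 then (st.1.modify gk.1 [] (· ++ [v]), PySem.Set.add st.2 v) else st) st)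
      (grouped, PySem.Set.empty)
  let grouped := all_voices.foldl (fun d v =>
      if PySem.Set.contains st.2 v then d else d.modify "Other" [] (· ++ [v])) st.1
  grouped.items.filter (fun p => !p.2.isEmpty)

-- ===== PORT B =====
def voiceToGroup : PySem.Dict String String :=
  VOICE_GROUPS.items.foldl (fun d gk =>
    if gk.1 == "Other" then d else gk.2.foldl (fun d v => d.insert v gk.1) d) PySem.Dict.empty

def group_voices_alt (all_voices : List String) : List (String × List String) :=
  let grouped : PySem.Dict String (List String) :=
    VOICE_GROUPS.keys.foldl (fun d k => d.insert k []) PySem.Dict.empty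
  let grouped := all_voices.foldl (fun d v =>
      d.modify (voiceToGroup.getD v "Other") [] (· ++ [v])) grouped
  grouped.items.filter (fun p => !p.2.isEmpty)

-- ===== PRECONDITION & SPEC =====
def Spec_group_voices (all_voices : List String) (out : List (String × List String)) : Prop := out = group_voices_alt all_voices
instance (all_voices : List String) (out : List (String × List String)) : Decidable (Spec_group_voices all_voices out) := by unfold Spec_group_voices; infer_instance

-- ===== CLAIM (what is proved, stated in full; the proofs are below) =====
def Claim_equal_group_voices : Prop := ∀ (all_voices : List String), Dom_group_voices all_voices → Spec_group_voices all_voices (group_voices all_voices)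

-- ===== LEMMAS AND PROOFS =====

-- membership in one of the four known-voice lists
def inKnown (v : String) : Bool :=
  decide (v ∈ bfL) || decide (v ∈ bmL) || decide (v ∈ afL) || decide (v ∈ amL)

def keyOf (v : String) : String :=
  if v ∈ bfL then "British Female" else if v ∈ bmL then "British Male"
  else if v ∈ afL then "American Female" else if v ∈ amL then "American Male" else "Other"

-- the common normal form both ports are reduced to
def canonical (vs : List String) : List (String × List String) :=
  ([("British Female", vs.filter (fun v => decide (v ∈ bfL))),
    ("British Male",   vs.filter (fun v => decide (v ∈ bmL))),
    ("American Female", vs.filter (fun v => decide (v ∈ afL))),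
    ("American Male",  vs.filter (fun v => decide (v ∈ amL))),
    ("Other",          vs.filter (fun v => !inKnown v))]).filter (fun p => !p.2.isEmpty)

theorem key_eq (v : String) : voiceToGroup.getD v "Other" = keyOf v := by
  unfold keyOf
  by_cases h1 : v ∈ bfL
  · rw [if_pos h1]; fin_cases h1 <;> decide
  rw [if_neg h1]
  by_cases h2 : v ∈ bmL
  · rw [if_pos h2]; fin_cases h2 <;> decide
  rw [if_neg h2]
  by_cases h3 : v ∈ afL
  · rw [if_pos h3]; fin_cases h3 <;> decide
  rw [if_neg h3]
  by_cases h4 : v ∈ amL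
  · rw [if_pos h4]; fin_cases h4 <;> decide
  rw [if_neg h4]
  have hk : voiceToGroup.contains v = false := by
    rw [PySem.Dict.contains_eq_decide_mem_keys]
    have hkeys : voiceToGroup.keys = bfL ++ bmL ++ afL ++ amL := by decide
    rw [hkeys]
    simp [List.mem_append, h1, h2, h3, h4]
  exact PySem.Dict.getD_of_not_contains _ _ hk

theorem proj_filter_map (vs : List String) (f : String → String) (c : String) :
    ((vs.map (fun v => (f v, v))).filter (fun p => p.1 == c)).map (·.2)
      = vs.filter (fun v => f v == c) := by
  induction vs with
  | nil => rfl
  | cons v vs ih =>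
      by_cases h : f v == c <;> simp [h, ih]


theorem getD_key_loop (f : String → String) (c : String) (vs : List String)
    (d : PySem.Dict String (List String)) :
    (vs.foldl (fun d v => d.modify (f v) [] (· ++ [v])) d).getD c []
      = d.getD c [] ++ vs.filter (fun v => f v == c) := by
  have h := PySem.Dict.getD_foldl_modify_append (vs.map (fun v => (f v, v))) d c
  rw [List.foldl_map] at h
  rw [h, proj_filter_map]

theorem filter_const_beq (vs : List String) (k c : String) :
    vs.filter (fun _ => k == c) = if k == c then vs else [] := by
  cases h : k == c <;> simp

theorem getD_const_loop (k c : String) (vs : List String)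
    (d : PySem.Dict String (List String)) :
    (vs.foldl (fun d v => d.modify k [] (· ++ [v])) d).getD c []
      = d.getD c [] ++ if k == c then vs else [] := by
  rw [getD_key_loop (fun _ => k) c vs d, filter_const_beq]

theorem set_update_of_forall_mem (s : PySem.Set String) (l : List String)
    (h : ∀ x ∈ l, x ∈ s) : PySem.Set.update s l = s := by
  induction l generalizing s with
  | nil => rfl
  | cons x l ih =>
      rw [PySem.Set.update_cons, PySem.Set.add_of_mem (h x (by simp)), ih]
      intro y hy; exact h y (by simp [hy])


-- named loop bodies of port A (definitionally equal to the lambdas in group_voices)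
def D0 : PySem.Dict String (List String) :=
  PySem.Dict.mk [("British Female", []), ("British Male", []),
    ("American Female", []), ("American Male", []), ("Other", [])]

def Klit : List String :=
  ["British Female", "British Male", "American Female", "American Male", "Other"]

def dsStep (k : String) (known : List String) :
    PySem.Dict String (List String) × PySem.Set String → String →
    PySem.Dict String (List String) × PySem.Set String :=
  fun st v => if v ∈ known then (st.1.modify k [] (· ++ [v]), PySem.Set.add st.2 v) else st

def dmStep (k : String) (known : List String) :
    PySem.Dict String (List String) → String → PySem.Dict String (List String) :=
  fun d v => if v ∈ known then d.modify k [] (· ++ [v]) else d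

def ssStep (known : List String) : PySem.Set String → String → PySem.Set String :=
  fun s v => if v ∈ known then PySem.Set.add s v else s

theorem pair_split (k : String) (known : List String) (vs : List String)
    (d : PySem.Dict String (List String)) (s : PySem.Set String) :
    vs.foldl (dsStep k known) (d, s)
      = (vs.foldl (dmStep k known) d, vs.foldl (ssStep known) s) := by
  induction vs generalizing d s with
  | nil => rfl
  | cons v vs ih =>
      by_cases h : v ∈ known <;> simp [dsStep, dmStep, ssStep, h, ih]

theorem mem_ss (known vs : List String) (s0 : PySem.Set String) (x : String) :
    x ∈ vs.foldl (ssStep known) s0 ↔ x ∈ s0 ∨ (x ∈ vs ∧ x ∈ known) := by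
  unfold ssStep
  rw [PySem.List.foldl_ite_eq_foldl_filter]
  have hupd : ∀ l : List String, l.foldl PySem.Set.add s0 = PySem.Set.update s0 l := fun _ => rfl
  rw [hupd, PySem.Set.mem_update]
  simp [List.mem_filter, and_comm]

theorem keys_constmod (k : String) (l : List String) (d : PySem.Dict String (List String))
    (h : k ∈ d.keys) :
    (l.foldl (fun d v => d.modify k [] (· ++ [v])) d).keys = d.keys := by
  rw [PySem.Dict.keys_foldl_modify_key l (fun _ => k) [] (fun _ v => fun old => old ++ [v]) d]
  apply set_update_of_forall_mem
  intro x hx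
  simp only [List.mem_map] at hx
  obtain ⟨_, _, rfl⟩ := hx
  exact h

theorem keys_dm (k : String) (known vs : List String) (d : PySem.Dict String (List String))
    (h : k ∈ d.keys) :
    (vs.foldl (dmStep k known) d).keys = d.keys := by
  unfold dmStep
  rw [PySem.List.foldl_ite_eq_foldl_filter]
  exact keys_constmod k _ d h

theorem getD_dm (k : String) (known : List String) (c : String) (vs : List String)
    (d : PySem.Dict String (List String)) :
    (vs.foldl (dmStep k known) d).getD c []
      = d.getD c [] ++ if k == c then vs.filter (fun v => decide (v ∈ known)) else [] := by
  unfold dmStep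
  rw [PySem.List.foldl_ite_eq_foldl_filter]
  exact getD_const_loop k c _ d

theorem contains_S (vs : List String) (v : String) (h : v ∈ vs) :
    PySem.Set.contains
      (vs.foldl (ssStep amL) (vs.foldl (ssStep afL)
        (vs.foldl (ssStep bmL) (vs.foldl (ssStep bfL) PySem.Set.empty)))) v
      = inKnown v := by
  rw [Bool.eq_iff_iff, PySem.Set.contains_iff]
  simp [mem_ss, inKnown, h, PySem.Set.empty]


theorem other_loop (vs : List String) (d : PySem.Dict String (List String)) :
    vs.foldl (fun d v =>
        if PySem.Set.contains
            (vs.foldl (ssStep amL) (vs.foldl (ssStep afL)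
              (vs.foldl (ssStep bmL) (vs.foldl (ssStep bfL) PySem.Set.empty)))) v
        then d else d.modify "Other" [] (fun x => x ++ [v])) d
      = (vs.filter (fun v => !inKnown v)).foldl
          (fun d v => d.modify "Other" [] (fun x => x ++ [v])) d := by
  have h : ∀ (acc : PySem.Dict String (List String)) (x : String), x ∈ vs →
      (if PySem.Set.contains
            (vs.foldl (ssStep amL) (vs.foldl (ssStep afL)
              (vs.foldl (ssStep bmL) (vs.foldl (ssStep bfL) PySem.Set.empty)))) x
        then acc else acc.modify "Other" [] (fun y => y ++ [x]))
      = (if !inKnown x then acc.modify "Other" [] (fun y => y ++ [x]) else acc) := by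
    intro acc x hx
    rw [contains_S vs x hx]
    cases hik : inKnown x <;> simp
  rw [← PySem.List.foldl_if_eq_foldl_filter]
  exact PySem.List.foldl_congr_mem _ _ _ _ h

theorem A_char (vs : List String) : group_voices vs = canonical vs := by
  have h0 : group_voices vs =
      (let st := vs.foldl (dsStep "American Male" amL) (vs.foldl (dsStep "American Female" afL)
        (vs.foldl (dsStep "British Male" bmL) (vs.foldl (dsStep "British Female" bfL)
          (D0, PySem.Set.empty))));
       (vs.foldl (fun d v =>
          if PySem.Set.contains st.2 v then d else d.modify "Other" [] (· ++ [v])) st.1).items.filter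
            (fun p => !p.2.isEmpty)) := rfl
  rw [h0]
  simp only [pair_split]
  rw [other_loop]
  have k0 : D0.keys = Klit := rfl
  have k1 := keys_dm "British Female" bfL vs D0 (by rw [k0]; decide)
  have k2 := keys_dm "British Male" bmL vs _ (by rw [k1, k0]; decide)
  have k3 := keys_dm "American Female" afL vs _ (by rw [k2, k1, k0]; decide)
  have k4 := keys_dm "American Male" amL vs _ (by rw [k3, k2, k1, k0]; decide)
  have kO := keys_constmod "Other" (vs.filter (fun v => !inKnown v)) _
      (by rw [k4, k3, k2, k1, k0]; decide)
  have hnd : (List.foldl (fun d v => d.modify "Other" [] fun x => x ++ [v])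
      (List.foldl (dmStep "American Male" amL)
        (List.foldl (dmStep "American Female" afL)
          (List.foldl (dmStep "British Male" bmL) (List.foldl (dmStep "British Female" bfL) D0 vs) vs) vs)
        vs)
      (vs.filter (fun v => !inKnown v))).keys.Nodup := by
    rw [kO, k4, k3, k2, k1, k0]; decide
  rw [PySem.Dict.items_eq_map_keys _ hnd []]
  rw [kO, k4, k3, k2, k1, k0]
  have g1 : D0.getD "British Female" [] = ([] : List String) := rfl
  have g2 : D0.getD "British Male" [] = ([] : List String) := rfl
  have g3 : D0.getD "American Female" [] = ([] : List String) := rfl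
  have g4 : D0.getD "American Male" [] = ([] : List String) := rfl
  have g5 : D0.getD "Other" [] = ([] : List String) := rfl
  simp only [Klit, List.map_cons, List.map_nil, getD_const_loop, getD_dm,
    g1, g2, g3, g4, g5]
  simp [canonical]



theorem bf_not (v : String) (h : v ∈ bfL) : v ∉ bmL ∧ v ∉ afL ∧ v ∉ amL := by
  fin_cases h <;> refine ⟨by decide, by decide, by decide⟩
theorem bm_not (v : String) (h : v ∈ bmL) : v ∉ bfL ∧ v ∉ afL ∧ v ∉ amL := by
  fin_cases h <;> refine ⟨by decide, by decide, by decide⟩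
theorem af_not (v : String) (h : v ∈ afL) : v ∉ bfL ∧ v ∉ bmL ∧ v ∉ amL := by
  fin_cases h <;> refine ⟨by decide, by decide, by decide⟩
theorem am_not (v : String) (h : v ∈ amL) : v ∉ bfL ∧ v ∉ bmL ∧ v ∉ afL := by
  fin_cases h <;> refine ⟨by decide, by decide, by decide⟩

theorem keyOf_spec (v : String) :
    (keyOf v == "British Female") = decide (v ∈ bfL) ∧
    (keyOf v == "British Male") = decide (v ∈ bmL) ∧
    (keyOf v == "American Female") = decide (v ∈ afL) ∧
    (keyOf v == "American Male") = decide (v ∈ amL) ∧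
    (keyOf v == "Other") = !inKnown v := by
  unfold keyOf inKnown
  by_cases h1 : v ∈ bfL
  · obtain ⟨n1, n2, n3⟩ := bf_not v h1
    simp [h1, n1, n2, n3]
  by_cases h2 : v ∈ bmL
  · obtain ⟨n1, n2, n3⟩ := bm_not v h2
    simp [h1, h2, n2, n3]
  by_cases h3 : v ∈ afL
  · obtain ⟨n1, n2, n3⟩ := af_not v h3
    simp [h1, h2, h3, n3]
  by_cases h4 : v ∈ amL
  · obtain ⟨n1, n2, n3⟩ := am_not v h4
    simp [h1, h2, h3, h4]
  simp [h1, h2, h3, h4]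

theorem keyOf_mem_Klit (v : String) : keyOf v ∈ Klit := by
  unfold keyOf; split_ifs <;> decide

theorem B_char (vs : List String) : group_voices_alt vs = canonical vs := by
  have h0 : group_voices_alt vs =
      (vs.foldl (fun d v => d.modify (voiceToGroup.getD v "Other") [] (fun x => x ++ [v]))
        D0).items.filter (fun p => !p.2.isEmpty) := rfl
  rw [h0]
  have hk : vs.foldl (fun d v => d.modify (voiceToGroup.getD v "Other") [] (fun x => x ++ [v])) D0
      = vs.foldl (fun d v => d.modify (keyOf v) [] (fun x => x ++ [v])) D0 :=
    PySem.List.foldl_congr_mem _ _ _ _ (by intro acc x _; rw [key_eq])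
  rw [hk]
  have hkeys : (vs.foldl (fun d v => d.modify (keyOf v) [] (fun x => x ++ [v])) D0).keys = Klit := by
    rw [PySem.Dict.keys_foldl_modify_key vs keyOf [] (fun _ v => fun old => old ++ [v]) D0]
    rw [show D0.keys = Klit from rfl]
    apply set_update_of_forall_mem
    intro x hx
    simp only [List.mem_map] at hx
    obtain ⟨v, _, rfl⟩ := hx
    exact keyOf_mem_Klit v
  have hnd : (vs.foldl (fun d v => d.modify (keyOf v) [] (fun x => x ++ [v])) D0).keys.Nodup := by
    rw [hkeys]; decide
  rw [PySem.Dict.items_eq_map_keys _ hnd [], hkeys]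
  have g1 : D0.getD "British Female" [] = ([] : List String) := rfl
  have g2 : D0.getD "British Male" [] = ([] : List String) := rfl
  have g3 : D0.getD "American Female" [] = ([] : List String) := rfl
  have g4 : D0.getD "American Male" [] = ([] : List String) := rfl
  have g5 : D0.getD "Other" [] = ([] : List String) := rfl
  have e1 : vs.filter (fun v => keyOf v == "British Female") = vs.filter (fun v => decide (v ∈ bfL)) :=
    List.filter_congr (fun v _ => (keyOf_spec v).1)
  have e2 : vs.filter (fun v => keyOf v == "British Male") = vs.filter (fun v => decide (v ∈ bmL)) :=
    List.filter_congr (fun v _ => (keyOf_spec v).2.1)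
  have e3 : vs.filter (fun v => keyOf v == "American Female") = vs.filter (fun v => decide (v ∈ afL)) :=
    List.filter_congr (fun v _ => (keyOf_spec v).2.2.1)
  have e4 : vs.filter (fun v => keyOf v == "American Male") = vs.filter (fun v => decide (v ∈ amL)) :=
    List.filter_congr (fun v _ => (keyOf_spec v).2.2.2.1)
  have e5 : vs.filter (fun v => keyOf v == "Other") = vs.filter (fun v => !inKnown v) :=
    List.filter_congr (fun v _ => (keyOf_spec v).2.2.2.2)
  simp only [Klit, List.map_cons, List.map_nil, getD_key_loop, g1, g2, g3, g4, g5,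
    List.nil_append, e1, e2, e3, e4, e5]
  simp [canonical]

theorem group_voices_spec : Claim_equal_group_voices := by
  intro vs _
  unfold Spec_group_voices
  rw [A_char, B_char]
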